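-- pv_equiv track=rewrite | github.com/xfbyxq/ai-novel-system | agents/similarity_detector.py | _normalize_lengths
-- ===== SOURCE A (Python) =====
-- from typing import Any, Dict, List, Optional, Tuple
--
-- def _normalize_lengths(paragraphs: List[str]) -> List[str]:
--     """将段落长度归一化为分类标签."""
--     labels = []
--     for p in paragraphs:
--         length = len(p)
--         if length < 50:
--             labels.append("short")
--         elif length < 200:
--             labels.append("medium")
--         else:
--             labels.append("long")
--     return labels
-- ===== SOURCE B (Python) =====
-- def _bisect_right(a, x):
--     lo, hi = 0, len(a)
--     while lo < hi:
--         mid = (lo + hi) // 2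
--         if x < a[mid]:
--             hi = mid
--         else:
--             lo = mid + 1
--     return lo
--
-- _THRESHOLDS = [50, 200]
-- _NAMES = ["short", "medium", "long"]
--
-- def _normalize_lengths(paragraphs):
--     return [_NAMES[_bisect_right(_THRESHOLDS, len(p))] for p in paragraphs]
-- ===== Notes on version B (the rewrite author's own statement) =====
-- stated objective: alternative
-- what changed: Replaces the if/elif/else comparison cascade by a binary search (hand-written bisect_right) over a sorted threshold table [50,200] indexing a parallel name table, built as a list comprehension instead of an append loop.
import Mathlib
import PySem

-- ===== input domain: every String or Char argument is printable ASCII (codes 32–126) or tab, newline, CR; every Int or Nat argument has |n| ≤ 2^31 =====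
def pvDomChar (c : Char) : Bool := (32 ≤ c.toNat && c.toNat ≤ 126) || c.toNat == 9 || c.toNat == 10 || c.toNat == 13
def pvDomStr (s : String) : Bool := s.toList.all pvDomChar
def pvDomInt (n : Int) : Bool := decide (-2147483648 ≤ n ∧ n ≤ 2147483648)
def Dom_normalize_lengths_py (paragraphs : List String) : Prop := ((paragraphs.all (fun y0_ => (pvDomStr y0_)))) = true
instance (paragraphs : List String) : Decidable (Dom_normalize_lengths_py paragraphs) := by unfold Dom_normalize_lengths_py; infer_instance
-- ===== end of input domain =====

-- B replaces A's if/elif/else cascade by a hand-written bisect_right binary search over a sorted threshold table with a parallel name table (alternative structure, same cost).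


-- ===== PORT A =====
def normalize_lengths_py (paragraphs : List String) : List String :=
  paragraphs.foldl (fun labels p =>
    let length := PySem.Str.len p
    if length < 50 then labels ++ ["short"]
    else if length < 200 then labels ++ ["medium"]
    else labels ++ ["long"]) []

-- ===== PORT B =====
-- hand-written bisect_right from Source B; a[mid] is always in range (0 ≤ lo ≤ mid < hi ≤ a.length), so getD's default is never used
def pvBisectRight (a : List Int) (x : Int) (lo hi : Nat) : Nat :=
  if lo < hi then
    let mid := (lo + hi) / 2
    if x < a.getD mid 0 then pvBisectRight a x lo mid
    else pvBisectRight a x (mid + 1) hi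
  else lo
termination_by hi - lo
decreasing_by all_goals omega

def pvThresholds : List Int := [50, 200]
def pvNames : List String := ["short", "medium", "long"]

-- _NAMES[idx]: idx is always 0, 1 or 2, in range, so getD's default is never used
def normalize_lengths_py_alt (paragraphs : List String) : List String :=
  paragraphs.map (fun p => pvNames.getD (pvBisectRight pvThresholds (PySem.Str.len p) 0 pvThresholds.length) "")

-- ===== PRECONDITION & SPEC =====
def Spec_normalize_lengths_py (paragraphs : List String) (out : List String) : Prop := out = normalize_lengths_py_alt paragraphs
instance (paragraphs : List String) (out : List String) : Decidable (Spec_normalize_lengths_py paragraphs out) := by unfold Spec_normalize_lengths_py; infer_instance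

-- ===== CLAIM (what is proved, stated in full; the proofs are below) =====
def Claim_equal_normalize_lengths_py : Prop := ∀ (paragraphs : List String), Dom_normalize_lengths_py paragraphs → Spec_normalize_lengths_py paragraphs (normalize_lengths_py paragraphs)

-- ===== LEMMAS AND PROOFS =====

-- ===== VERDICT (by name: the statement is the Claim_ definition above) =====
-- per-element: the binary-searched table lookup equals A's comparison chain
theorem pvElem (x : Int) :
    pvNames.getD (pvBisectRight pvThresholds x 0 pvThresholds.length) "" =
    (if x < 50 then "short" else if x < 200 then "medium" else "long") := by
  by_cases h1 : x < 50
  · have h2 : x < 200 := by omega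
    simp [pvBisectRight, pvThresholds, pvNames, h1, h2]
  · by_cases h2 : x < 200
    · simp [pvBisectRight, pvThresholds, pvNames, h1, h2]
    · simp [pvBisectRight, pvThresholds, pvNames, h1, h2]

theorem pvFoldl (l : List String) (acc : List String) :
    l.foldl (fun labels p =>
      let length := PySem.Str.len p
      if length < 50 then labels ++ ["short"]
      else if length < 200 then labels ++ ["medium"]
      else labels ++ ["long"]) acc
    = acc ++ l.map (fun p =>
        if PySem.Str.len p < 50 then "short"
        else if PySem.Str.len p < 200 then "medium" else "long") := by
  induction l generalizing acc with
  | nil => simp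
  | cons x xs ih =>
    simp only [List.foldl, List.map]
    rw [ih]
    split_ifs <;> simp

-- ===== VERDICT (by name: the statement is the Claim_ definition above) =====
theorem normalize_lengths_py_spec : Claim_equal_normalize_lengths_py := by
  intro paragraphs _
  show normalize_lengths_py paragraphs = normalize_lengths_py_alt paragraphs
  unfold normalize_lengths_py normalize_lengths_py_alt
  rw [pvFoldl]
  simp only [← pvElem]
  simp
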